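-- pv_equiv track=rewrite | github.com/MrBrantCode/unitest_baseline | mut_generate/mist_train_taco/taco_16287/solution.py | determine_gender_by_username
-- ===== SOURCE A (Python) =====
-- def determine_gender_by_username(username: str) -> str:
--     # Convert the username to a set to get distinct characters
--     distinct_chars = set(username)
--
--     # Define the vowels
--     vowels = 'aeiou'
--
--     # Count the distinct consonants
--     distinct_consonants_count = 0
--     for char in distinct_chars:
--         if char not in vowels:
--             distinct_consonants_count += 1
--
--     # Determine the gender based on the count of distinct consonants
--     if distinct_consonants_count % 2 == 0:
--         return 'SHE!'
--     else:
--         return 'HE!'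
-- ===== SOURCE B (Python) =====
-- def determine_gender_by_username(username: str) -> str:
--     # Recursive strip-and-filter: take the first remaining character, toggle parity
--     # if it is a consonant, and recurse on the list with ALL its occurrences removed.
--     # No set is ever built; distinctness comes from the filtering itself.
--     def parity(chars):
--         if not chars:
--             return 0
--         c = chars[0]
--         rest = [x for x in chars if x != c]
--         return ((0 if c in 'aeiou' else 1) + parity(rest)) % 2
--     return 'SHE!' if parity(list(username)) == 0 else 'HE!'
-- ===== Notes on version B (the rewrite author's own statement) =====
-- stated objective: alternative
-- what changed: B never builds a set: it recursively takes the first remaining character, toggles a parity bit if it is a consonant, and recurses on the list with all occurrences of that character filtered out, so distinctness comes from the filtering itself.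
import Mathlib
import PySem

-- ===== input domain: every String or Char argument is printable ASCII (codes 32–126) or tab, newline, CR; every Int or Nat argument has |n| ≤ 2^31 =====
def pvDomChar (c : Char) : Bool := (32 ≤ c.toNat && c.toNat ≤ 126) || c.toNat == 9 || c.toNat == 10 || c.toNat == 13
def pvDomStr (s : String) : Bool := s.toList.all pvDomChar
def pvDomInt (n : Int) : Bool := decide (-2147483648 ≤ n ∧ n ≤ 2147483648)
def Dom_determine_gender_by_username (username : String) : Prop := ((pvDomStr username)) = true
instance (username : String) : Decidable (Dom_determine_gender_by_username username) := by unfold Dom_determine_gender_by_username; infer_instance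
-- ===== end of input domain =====

-- B replaces A's set-then-classify loop by a recursive strip-and-filter: take the first remaining
-- character, toggle parity if it is a consonant, recurse on the list with all its occurrences
-- filtered out (objective: alternative — no set is built).

-- ===== PORT A =====
-- A iterates over set(username) only to count; the count is order-independent, so folding over
-- PySem.Set.ofList (first-occurrence order) is exact.
def determine_gender_by_username (username : String) : String :=
  let distinct_chars := PySem.Set.ofList username.toList
  let vowels := "aeiou".toList
  let distinct_consonants_count : Int :=
    distinct_chars.foldl (fun acc char => if char ∉ vowels then acc + 1 else acc) 0
  if PySem.Int.mod distinct_consonants_count 2 == 0 then "SHE!" else "HE!"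

-- ===== PORT B =====
-- helper 'parity' of Source B: head char, toggle if consonant, recurse on the filtered tail
def pvParity (chars : List Char) : Int :=
  match chars with
  | [] => 0
  | c :: tl =>
    PySem.Int.mod ((if c ∈ "aeiou".toList then (0 : Int) else 1)
      + pvParity (tl.filter (fun x => x ≠ c))) 2
termination_by chars.length
decreasing_by
  simp only [List.length_unattach, List.length_cons]
  exact Nat.lt_succ_of_le (le_trans (List.length_filter_le _ _) (by simp))

def determine_gender_by_username_alt (username : String) : String :=
  if pvParity username.toList == 0 then "SHE!" else "HE!"

-- ===== PRECONDITION & SPEC =====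
def Spec_determine_gender_by_username (username : String) (out : String) : Prop := out = determine_gender_by_username_alt username
instance (username : String) (out : String) : Decidable (Spec_determine_gender_by_username username out) := by unfold Spec_determine_gender_by_username; infer_instance

-- ===== CLAIM (what is proved, stated in full; the proofs are below) =====
def Claim_equal_determine_gender_by_username : Prop := ∀ (username : String), Dom_determine_gender_by_username username → Spec_determine_gender_by_username username (determine_gender_by_username username)

-- ===== LEMMAS AND PROOFS =====

-- the distinct elements of c :: tl are, as a set, c together with the distinct elements of tl ≠ c
theorem ofList_cons_perm (c : Char) (tl : List Char) :
    (PySem.Set.ofList (c :: tl)).Perm (c :: PySem.Set.ofList (tl.filter (fun x => x ≠ c))) := by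
  apply (List.perm_ext_iff_of_nodup (PySem.Set.nodup_ofList _) ?_).mpr
  · intro a
    simp [PySem.Set.mem_ofList, List.mem_filter, List.mem_cons]
    tauto
  · refine List.nodup_cons.mpr ⟨?_, PySem.Set.nodup_ofList _⟩
    simp [PySem.Set.mem_ofList, List.mem_filter]

-- pvParity computes the parity (as 0/1) of the number of distinct consonants
theorem pvParity_eq (l : List Char) :
    pvParity l
      = PySem.Int.mod ((PySem.Set.ofList l).countP (fun ch => ch ∉ "aeiou".toList) : Int) 2 := by
  match l with
  | [] => simp [pvParity, PySem.Set.ofList]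
  | c :: tl =>
    have ih := pvParity_eq (tl.filter (fun x => x ≠ c))
    rw [pvParity, ih]
    have hperm := (ofList_cons_perm c tl).countP_eq (fun ch => decide (ch ∉ "aeiou".toList))
    rw [hperm, List.countP_cons]
    rw [PySem.Int.mod_eq_emod_of_pos (by norm_num), PySem.Int.mod_eq_emod_of_pos (by norm_num),
        PySem.Int.mod_eq_emod_of_pos (by norm_num)]
    by_cases hc : c ∈ "aeiou".toList
    · rw [if_pos hc, if_neg (by simp at hc ⊢; tauto)]; push_cast; omega
    · rw [if_neg hc, if_pos (by simp at hc ⊢; tauto)]; push_cast; omega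
termination_by l.length
decreasing_by
  simp only [List.length_cons]
  exact Nat.lt_succ_of_le (le_trans (List.length_filter_le _ _) (by simp))

theorem determine_gender_eq (username : String) :
    determine_gender_by_username username = determine_gender_by_username_alt username := by
  unfold determine_gender_by_username determine_gender_by_username_alt
  dsimp only
  rw [pvParity_eq]
  have hA := PySem.List.foldl_count_if (fun c => decide (c ∉ "aeiou".toList))
    (PySem.Set.ofList username.toList) 0
  simp only [decide_eq_true_eq] at hA
  rw [hA, zero_add]

-- ===== VERDICT (by name: the statement is the Claim_ definition above) =====
theorem determine_gender_by_username_spec : Claim_equal_determine_gender_by_username := by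
  intro username _
  exact determine_gender_eq username
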